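-- pv_equiv track=rewrite | github.com/ParthPatel2000/neural_net_for_2048 | heuristics_ai.py | build_ideal_board
-- ===== SOURCE A (Python) =====
-- from typing import Dict, List, Tuple, Optional, Union
--
-- def build_ideal_board(board: List[List[int]]) -> List[List[int]]:
--     """Build ideal monotonic board for normalization"""
--     rows = len(board)
--     cols = len(board[0])
--     tiles = sorted([val for row in board for val in row if val != 0], reverse=True)
--
--     ideal = [[0] * cols for _ in range(rows)]
--     idx = 0
--
--     for r in range(rows):
--         for c in range(cols):
--             if idx < len(tiles):
--                 ideal[r][c] = tiles[idx]
--                 idx += 1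
--
--     return ideal
-- ===== SOURCE B (Python) =====
-- from typing import List
--
--
-- def build_ideal_board(board: List[List[int]]) -> List[List[int]]:
--     """Build ideal monotonic board for normalization"""
--     cols = len(board[0])
--     tiles = sorted((val for row in board for val in row if val != 0), reverse=True)
--
--     def rows_from(n: int, ts: List[int]) -> List[List[int]]:
--         if n == 0:
--             return []
--         chunk = ts[:cols]
--         return [chunk + [0] * (cols - len(chunk))] + rows_from(n - 1, ts[cols:])
--
--     return rows_from(len(board), tiles)
-- ===== Notes on version B (the rewrite author's own statement) =====
-- stated objective: alternative
-- what changed: Replaces A's preallocated zero matrix filled cell-by-cell under an idx<len(tiles) guard with a recursive decomposition that peels one row at a time off the sorted tile list (take a cols-sized chunk, right-pad it with zeros, recurse on the rest).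
import Mathlib
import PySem

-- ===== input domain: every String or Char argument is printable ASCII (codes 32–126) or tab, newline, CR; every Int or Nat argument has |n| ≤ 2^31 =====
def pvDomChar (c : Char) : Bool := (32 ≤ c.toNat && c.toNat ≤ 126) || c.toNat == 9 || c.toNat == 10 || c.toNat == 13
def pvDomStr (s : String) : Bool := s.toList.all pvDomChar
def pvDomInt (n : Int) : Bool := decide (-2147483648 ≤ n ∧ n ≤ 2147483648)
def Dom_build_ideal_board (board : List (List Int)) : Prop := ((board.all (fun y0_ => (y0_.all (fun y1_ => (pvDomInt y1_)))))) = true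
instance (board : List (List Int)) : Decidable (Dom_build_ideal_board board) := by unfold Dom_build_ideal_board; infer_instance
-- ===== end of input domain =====

-- B replaces A's guarded cell-by-cell fill of a preallocated zero matrix by a recursion that
-- peels one cols-sized chunk at a time off the sorted tile list, right-padding each with zeros
-- (objective: alternative decomposition, same cost).

-- ===== PORT A =====
def build_ideal_board (board : List (List Int)) : List (List Int) :=
  match PySem.List.pyGet? board 0 with
  | none => []  -- board[0] raises IndexError; excluded by Pre_
  | some row0 =>
    let rows := board.length
    let cols := row0.length
    let tiles := PySem.List.sorted (board.flatMap (fun row => row.filter (fun v => v != 0))) (fun x => x) true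
    let ideal0 := List.replicate rows (List.replicate cols (0 : Int))
    -- nested for-loops with the idx < len(tiles) guard, mutating ideal[r][c]
    ((List.range rows).foldl (fun st r =>
        (List.range cols).foldl (fun st2 c =>
          if st2.2 < tiles.length then
            (st2.1.set r ((st2.1.getD r []).set c (tiles.getD st2.2 0)), st2.2 + 1)
          else st2) st) (ideal0, 0)).1

-- ===== PORT B =====
-- rows_from: ts[:cols] = take, ts[cols:] = drop (exact: cols is a nonnegative length)
def rowsFrom (cols : Nat) : Nat → List Int → List (List Int)
  | 0, _ => []
  | n + 1, ts =>
    let chunk := ts.take cols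
    (chunk ++ List.replicate (cols - chunk.length) (0 : Int)) :: rowsFrom cols n (ts.drop cols)

def build_ideal_board_alt (board : List (List Int)) : List (List Int) :=
  match PySem.List.pyGet? board 0 with
  | none => []  -- board[0] raises IndexError; excluded by Pre_
  | some row0 =>
    let cols := row0.length
    let tiles := PySem.List.sorted (board.flatMap (fun row => row.filter (fun v => v != 0))) (fun x => x) true
    rowsFrom cols board.length tiles

-- ===== PRECONDITION & SPEC =====
-- Pre_ excludes exactly the empty board, on which A raises IndexError at board[0].
def Pre_build_ideal_board (board : List (List Int)) : Prop := board ≠ []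
instance (board : List (List Int)) : Decidable (Pre_build_ideal_board board) := by unfold Pre_build_ideal_board; infer_instance
def pvWitness_build_ideal_board : List (List Int) := [[2, 0], [0, 4]]

def Spec_build_ideal_board (board : List (List Int)) (out : List (List Int)) : Prop := out = build_ideal_board_alt board
instance (board : List (List Int)) (out : List (List Int)) : Decidable (Spec_build_ideal_board board out) := by unfold Spec_build_ideal_board; infer_instance

-- ===== CLAIM (what is proved, stated in full; the proofs are below) =====
def Claim_equal_build_ideal_board : Prop := ∀ (board : List (List Int)), Dom_build_ideal_board board → Pre_build_ideal_board board → Spec_build_ideal_board board (build_ideal_board board)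

-- ===== LEMMAS AND PROOFS =====

-- row r of the final board, as a function of the entering value of idx
def fillRow (tiles : List Int) (idx cols : Nat) : List Int :=
  (List.range cols).map (fun c => if idx + c < tiles.length then tiles.getD (idx + c) 0 else 0)

lemma setAt {α : Type} (P rest : List α) (x v : α) (m : Nat) (hP : P.length = m) :
    (P ++ x :: rest).set m v = P ++ v :: rest := by
  subst hP; simp

-- the inner for-c loop on a single row
lemma rowFold (tiles : List Int) :
    ∀ (m : Nat) (row : List Int) (idx : Nat), m ≤ row.length → idx ≤ tiles.length →
    (List.range m).foldl (fun (st2 : List Int × Nat) c =>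
        if st2.2 < tiles.length then (st2.1.set c (tiles.getD st2.2 0), st2.2 + 1) else st2)
      (row, idx)
    = ((List.range m).map (fun c => if idx + c < tiles.length then tiles.getD (idx + c) 0 else row.getD c 0)
        ++ row.drop m,
       min (idx + m) tiles.length) := by
  intro m
  induction m with
  | zero => intro row idx _ hidx; simp; omega
  | succ m ih =>
    intro row idx hm hidx
    have hm' : m < row.length := by omega
    rw [List.range_succ, List.foldl_append, ih row idx (by omega) hidx, List.map_append]
    simp only [List.foldl_cons, List.foldl_nil, List.map_cons, List.map_nil]
    rw [List.drop_eq_getElem_cons hm']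
    by_cases h : idx + m < tiles.length
    · have hmin : min (idx + m) tiles.length = idx + m := by omega
      rw [hmin]
      simp only [h, if_pos, Prod.mk.injEq]
      refine ⟨?_, by omega⟩
      rw [setAt _ _ _ _ m (by simp)]
      simp [h]
    · have hmin : min (idx + m) tiles.length = tiles.length := by omega
      rw [hmin]
      simp only [lt_irrefl, if_false, Prod.mk.injEq]
      refine ⟨?_, by omega⟩
      simp [h]
      rw [List.drop_eq_getElem_cons hm']
      simp [List.getElem?_eq_getElem hm']

-- lifting the inner loop from row state to board state
lemma liftFold (tiles : List Int) (r : Nat) :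
    ∀ (l : List Nat) (ideal : List (List Int)) (row : List Int) (idx : Nat), r < ideal.length →
    l.foldl (fun (st2 : List (List Int) × Nat) c =>
        if st2.2 < tiles.length then
          (st2.1.set r ((st2.1.getD r []).set c (tiles.getD st2.2 0)), st2.2 + 1)
        else st2)
      (ideal.set r row, idx)
    = (ideal.set r ((l.foldl (fun (st2 : List Int × Nat) c =>
          if st2.2 < tiles.length then (st2.1.set c (tiles.getD st2.2 0), st2.2 + 1) else st2) (row, idx)).1),
       (l.foldl (fun (st2 : List Int × Nat) c =>
          if st2.2 < tiles.length then (st2.1.set c (tiles.getD st2.2 0), st2.2 + 1) else st2) (row, idx)).2) := by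
  intro l
  induction l with
  | nil => intro ideal row idx _; simp
  | cons c cs ih =>
    intro ideal row idx hr
    have hgd : (ideal.set r row).getD r [] = row := by
      simp [List.getD, hr]
    by_cases h : idx < tiles.length
    · simp only [List.foldl_cons, h, if_pos, hgd, List.set_set]
      exact ih ideal (row.set c (tiles.getD idx 0)) (idx + 1) hr
    · simp only [List.foldl_cons, h, if_false]
      exact ih ideal row idx hr

-- the outer for-r loop: after n rows the board is n filled rows then pristine zero rows
lemma outerFold (tiles : List Int) (rows cols : Nat) :
    ∀ (n : Nat), n ≤ rows →
    (List.range n).foldl (fun st r =>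
        (List.range cols).foldl (fun (st2 : List (List Int) × Nat) c =>
          if st2.2 < tiles.length then
            (st2.1.set r ((st2.1.getD r []).set c (tiles.getD st2.2 0)), st2.2 + 1)
          else st2) st)
      (List.replicate rows (List.replicate cols (0 : Int)), 0)
    = ((List.range n).map (fun j => fillRow tiles (min (j * cols) tiles.length) cols)
        ++ List.replicate (rows - n) (List.replicate cols (0 : Int)),
       min (n * cols) tiles.length) := by
  intro n
  induction n with
  | zero => intro _; simp [fillRow]
  | succ n ih =>
    intro hn
    rw [List.range_succ, List.foldl_append, ih (by omega), List.foldl_cons, List.foldl_nil]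
    have hk : rows - n = (rows - n - 1) + 1 := by omega
    rw [hk, List.replicate_succ]
    rw [← setAt ((List.range n).map (fun j => fillRow tiles (min (j * cols) tiles.length) cols))
          (List.replicate (rows - n - 1) (List.replicate cols (0 : Int)))
          (List.replicate cols (0 : Int)) (List.replicate cols (0 : Int)) n (by simp)]
    rw [liftFold tiles n (List.range cols) _ (List.replicate cols (0 : Int)) (min (n * cols) tiles.length)
          (by simp)]
    rw [rowFold tiles cols (List.replicate cols (0 : Int)) (min (n * cols) tiles.length)
          (by simp) (by omega)]
    simp only [List.drop_replicate, Nat.sub_self, List.replicate_zero, List.append_nil, Prod.mk.injEq]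
    constructor
    · rw [setAt _ _ _ _ n (by simp)]
      rw [List.map_append, List.map_cons, List.map_nil, List.append_assoc, List.singleton_append]
      congr 1
      congr 1
      unfold fillRow
      apply List.map_congr_left
      intro c _
      simp
    · have hexp : (n + 1) * cols = n * cols + cols := by ring
      omega

-- one padded chunk of the suffix tiles.drop k is exactly a filled row
lemma padChunkEq (tiles : List Int) (cols k : Nat) :
    (tiles.drop k).take cols ++ List.replicate (cols - ((tiles.drop k).take cols).length) (0 : Int)
    = fillRow tiles (min k tiles.length) cols := by
  apply List.ext_getElem
  · simp [fillRow]
  · intro c hc1 hc2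
    have hcols : c < cols := by simp [fillRow] at hc2; omega
    simp only [fillRow, List.getElem_map, List.getElem_range]
    clear hc2
    by_cases h : c < ((tiles.drop k).take cols).length
    · rw [List.getElem_append_left h]
      have hk : k + c < tiles.length := by simp at h; omega
      have hmin : min k tiles.length = k := by omega
      simp [hmin, hk, List.getD]
    · rw [List.getElem_append_right (by omega)]
      have : ¬ (min k tiles.length + c < tiles.length) := by simp at h; omega
      simp [this]

-- B's recursion computes the same rows as A's fill
lemma rowsFromEq (tiles : List Int) (cols : Nat) :
    ∀ (n k : Nat), rowsFrom cols n (tiles.drop k)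
      = (List.range n).map (fun j => fillRow tiles (min (k + j * cols) tiles.length) cols) := by
  intro n
  induction n with
  | zero => intro k; simp [rowsFrom]
  | succ n ih =>
    intro k
    rw [List.range_succ_eq_map, List.map_cons, List.map_map]
    simp only [rowsFrom, List.drop_drop]
    rw [ih (k + cols)]
    congr 1
    · rw [padChunkEq]
      congr 1
      omega
    · apply List.map_congr_left
      intro j _
      simp only [Function.comp]
      congr 2
      simp [Nat.succ_eq_add_one]
      ring

-- ===== VERDICT (by name: the statement is the Claim_ definition above) =====
theorem build_ideal_board_spec : Claim_equal_build_ideal_board := by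
  unfold Claim_equal_build_ideal_board Spec_build_ideal_board Pre_build_ideal_board
  intro board _ hpre
  match board with
  | [] => exact absurd rfl hpre
  | b0 :: bs =>
    simp only [build_ideal_board, build_ideal_board_alt, PySem.List.pyGet?_zero_cons]
    rw [outerFold _ _ _ _ (le_refl _)]
    simp only [Nat.sub_self, List.replicate_zero, List.append_nil]
    have h0 : (PySem.List.sorted ((b0 :: bs).flatMap (fun row => row.filter (fun v => v != 0))) (fun x => x) true)
        = (PySem.List.sorted ((b0 :: bs).flatMap (fun row => row.filter (fun v => v != 0))) (fun x => x) true).drop 0 := by simp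
    rw [h0, rowsFromEq]
    simp
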